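-- pv_equiv track=rewrite | github.com/lee-kangpyo/fab-lite | app/agent/graph.py | _find_task_by_title
-- ===== SOURCE A (Python) =====
-- def _find_task_by_title(tasks: list, title: str) -> list:
--     """태스크 목록에서 제목으로 검색하여 후보를 반환합니다."""
--     exact_matches = []
--     partial_matches = []
--     for task in tasks:
--         if isinstance(task, dict):
--             task_title = task.get("title", "").lower()
--             if task_title == title.lower():
--                 exact_matches.append(task)
--             elif title.lower() in task_title:
--                 partial_matches.append(task)
--     return exact_matches if exact_matches else partial_matches
-- ===== SOURCE B (Python) =====
-- def _find_task_by_title(tasks: list, title: str) -> list: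
--     """태스크 목록에서 제목으로 검색하여 후보를 반환합니다."""
--     key = title.lower()
--     exact = [t for t in tasks
--              if isinstance(t, dict) and t.get("title", "").lower() == key]
--     if exact:
--         return exact
--     return [t for t in tasks
--             if isinstance(t, dict) and key in t.get("title", "").lower()]
-- ===== Notes on version B (the rewrite author's own statement) =====
-- stated objective: alternative
-- what changed: Replaced the single partitioning loop that builds both exact- and partial-match lists with two short-circuited filter passes: build the exact-match list first and return it if non-empty, scanning for partial matches only when it is empty (skipping the substring test and partial list entirely in that case).
import Mathlib
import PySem

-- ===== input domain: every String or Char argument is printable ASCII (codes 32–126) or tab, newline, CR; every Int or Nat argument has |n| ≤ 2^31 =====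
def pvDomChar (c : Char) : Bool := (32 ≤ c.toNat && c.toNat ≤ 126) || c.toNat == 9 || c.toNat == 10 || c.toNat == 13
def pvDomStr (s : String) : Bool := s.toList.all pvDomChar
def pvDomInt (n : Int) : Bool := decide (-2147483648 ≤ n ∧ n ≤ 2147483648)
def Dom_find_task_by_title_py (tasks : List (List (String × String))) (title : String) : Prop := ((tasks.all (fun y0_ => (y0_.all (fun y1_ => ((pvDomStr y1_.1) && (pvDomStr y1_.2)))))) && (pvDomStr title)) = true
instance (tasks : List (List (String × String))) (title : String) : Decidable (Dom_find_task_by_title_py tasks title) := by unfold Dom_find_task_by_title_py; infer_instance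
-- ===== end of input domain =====

-- B replaces A's single partitioning loop by two short-circuited filter passes (exact first, partial only if no exact match); same results, alternative decomposition.


-- ===== PORT A =====
-- task.get("title", "") : dict = assoc list, first match wins
def pvGetTitle (task : List (String × String)) : String := (task.lookup "title").getD ""

-- A: one loop over tasks, partitioning into exact_matches / partial_matches, then truthiness choice
def find_task_by_title_py (tasks : List (List (String × String))) (title : String) : List (List (String × String)) :=
  let p := tasks.foldl (fun (acc : List (List (String × String)) × List (List (String × String))) task =>
      -- isinstance(task, dict) is always true under the type convention
      let task_title := PySem.Str.lower (pvGetTitle task)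
      if task_title = PySem.Str.lower title then (acc.1 ++ [task], acc.2)
      else if PySem.Str.isIn (PySem.Str.lower title) task_title then (acc.1, acc.2 ++ [task])
      else acc) ([], [])
  if p.1.isEmpty then p.2 else p.1

-- ===== PORT B =====
-- B: exact-match filter first; lazy second filter for partial matches only if no exact match
def find_task_by_title_py_alt (tasks : List (List (String × String))) (title : String) : List (List (String × String)) :=
  let key := PySem.Str.lower title
  let exact := tasks.filter (fun t => PySem.Str.lower (pvGetTitle t) = key)
  if exact.isEmpty then
    tasks.filter (fun t => PySem.Str.isIn key (PySem.Str.lower (pvGetTitle t)))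
  else exact

-- ===== PRECONDITION & SPEC =====
def Spec_find_task_by_title_py (tasks : List (List (String × String))) (title : String) (out : List (List (String × String))) : Prop := out = find_task_by_title_py_alt tasks title
instance (tasks : List (List (String × String))) (title : String) (out : List (List (String × String))) : Decidable (Spec_find_task_by_title_py tasks title out) := by unfold Spec_find_task_by_title_py; infer_instance

-- ===== CLAIM (what is proved, stated in full; the proofs are below) =====
def Claim_equal_find_task_by_title_py : Prop := ∀ (tasks : List (List (String × String))) (title : String), Dom_find_task_by_title_py tasks title → Spec_find_task_by_title_py tasks title (find_task_by_title_py tasks title)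

-- ===== LEMMAS AND PROOFS =====

-- A's partitioning foldl computes two filters
theorem pv_fold_eq_filters (tasks : List (List (String × String))) (key : String)
    (acc : List (List (String × String)) × List (List (String × String))) :
    tasks.foldl (fun acc task =>
      let task_title := PySem.Str.lower (pvGetTitle task)
      if task_title = key then (acc.1 ++ [task], acc.2)
      else if PySem.Str.isIn key task_title then (acc.1, acc.2 ++ [task])
      else acc) acc
    = (acc.1 ++ tasks.filter (fun t => decide (PySem.Str.lower (pvGetTitle t) = key)),
       acc.2 ++ tasks.filter (fun t =>
         !decide (PySem.Str.lower (pvGetTitle t) = key) &&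
         PySem.Str.isIn key (PySem.Str.lower (pvGetTitle t)))) := by
  induction tasks generalizing acc with
  | nil => simp
  | cons t ts ih =>
    simp only [List.foldl_cons, List.filter_cons]
    by_cases h1 : PySem.Str.lower (pvGetTitle t) = key
    · rw [if_pos h1, ih, decide_eq_true h1]
      simp [List.append_assoc]
    · rw [if_neg h1]
      by_cases h2 : PySem.Str.isIn key (PySem.Str.lower (pvGetTitle t)) = true
      · rw [if_pos h2, ih, decide_eq_false h1, h2]
        simp [List.append_assoc]
      · rw [if_neg h2, ih, decide_eq_false h1, Bool.eq_false_iff.mpr h2]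
        simp

-- when no task matches exactly, the two partial-match filters agree
theorem pv_partial_congr (tasks : List (List (String × String))) (key : String)
    (h : tasks.filter (fun t => decide (PySem.Str.lower (pvGetTitle t) = key)) = []) :
    tasks.filter (fun t =>
        !decide (PySem.Str.lower (pvGetTitle t) = key) &&
        PySem.Str.isIn key (PySem.Str.lower (pvGetTitle t)))
      = tasks.filter (fun t => PySem.Str.isIn key (PySem.Str.lower (pvGetTitle t))) := by
  apply List.filter_congr
  intro t ht
  have hne : ¬ PySem.Str.lower (pvGetTitle t) = key := by
    intro he
    have : t ∈ tasks.filter (fun t => decide (PySem.Str.lower (pvGetTitle t) = key)) := by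
      simp [List.mem_filter, ht, he]
    simp [h] at this
  simp [hne]

-- ===== VERDICT (by name: the statement is the Claim_ definition above) =====
theorem find_task_by_title_py_spec : Claim_equal_find_task_by_title_py := by
  intro tasks title _
  unfold Spec_find_task_by_title_py find_task_by_title_py find_task_by_title_py_alt
  rw [pv_fold_eq_filters tasks (PySem.Str.lower title) ([], [])]
  simp only [List.nil_append]
  by_cases h : tasks.filter (fun t => decide (PySem.Str.lower (pvGetTitle t) = PySem.Str.lower title)) = []
  · rw [h]
    simp only [List.isEmpty_nil, if_true]
    exact pv_partial_congr tasks (PySem.Str.lower title) h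
  · rw [if_neg (by simp [List.isEmpty_iff, h]), if_neg (by simp [List.isEmpty_iff, h])]
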